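-- pv_equiv track=rewrite | github.com/Vincannes/NukeAPI | app/io_file.py | _filtrer_ranges
-- ===== SOURCE A (Python) =====
-- def _filtrer_ranges(dictionnary):
--     """Remove ranges that are already inside a range.
--     [(10, 15), (11, 12), (15, 20)] => [(10, 15), (15, 20)]
--     :param dictionnaire:
--     :return:
--     """
--     resultats = {}
--     ranges_traites = []
--
--     for cle, valeur in sorted(dictionnary.items()):
--         inclut = False
--
--         for range_trait in ranges_traites:
--             if cle >= range_trait[0] and valeur <= range_trait[1]:
--                 inclut = True
--                 break
--
--         if not inclut:
--             resultats[cle] = valeur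
--             ranges_traites.append((cle, valeur))
--
--     return resultats
-- ===== SOURCE B (Python) =====
-- def _filtrer_ranges(dictionnary):
--     """Remove ranges that are already inside a range.
--
--     Sort by key once, then a single pass tracking the running maximum end:
--     after the sort every earlier accepted range starts at or before the
--     current key, so a range is contained iff its end is <= the running max.
--     """
--     resultats = {}
--     max_end = None
--     for cle, valeur in sorted(dictionnary.items()):
--         if max_end is None or valeur > max_end:
--             resultats[cle] = valeur
--             max_end = valeur
--     return resultats
-- ===== Notes on version B (the rewrite author's own statement) =====
-- stated objective: alternative
-- what changed: Replaced the inner scan over all previously accepted ranges by a single running-maximum-end accumulator over the key-sorted items, so containment becomes one comparison per item.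
import Mathlib
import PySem

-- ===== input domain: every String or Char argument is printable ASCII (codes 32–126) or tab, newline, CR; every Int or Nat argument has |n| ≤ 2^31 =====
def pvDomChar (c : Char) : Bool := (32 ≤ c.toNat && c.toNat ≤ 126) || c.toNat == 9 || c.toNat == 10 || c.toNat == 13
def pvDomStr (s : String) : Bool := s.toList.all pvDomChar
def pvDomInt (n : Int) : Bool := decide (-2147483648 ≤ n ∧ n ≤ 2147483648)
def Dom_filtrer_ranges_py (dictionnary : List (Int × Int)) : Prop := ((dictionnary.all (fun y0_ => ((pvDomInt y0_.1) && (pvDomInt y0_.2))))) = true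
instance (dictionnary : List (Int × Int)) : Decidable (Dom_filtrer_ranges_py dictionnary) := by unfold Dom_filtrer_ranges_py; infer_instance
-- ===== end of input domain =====

-- B replaces A's inner scan over accepted ranges by a running maximum end over the key-sorted items.


-- ===== PORT A =====
-- inner containment scan: 'for range_trait in ranges_traites: if cle >= a and valeur <= b: break'
def pvStepA (acc : PySem.Dict Int Int × List (Int × Int)) (kv : Int × Int) :
    PySem.Dict Int Int × List (Int × Int) :=
  let inclut := acc.2.any (fun r => decide (kv.1 ≥ r.1) && decide (kv.2 ≤ r.2))
  if inclut then acc else (acc.1.insert kv.1 kv.2, acc.2 ++ [(kv.1, kv.2)])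

def filtrer_ranges_py (dictionnary : List (Int × Int)) : List (Int × Int) :=
  ((PySem.List.sorted2 dictionnary (fun p => p.1) (fun p => p.2)).foldl pvStepA
    (PySem.Dict.empty, [])).1.items

-- ===== PORT B =====
-- single pass: accept iff max_end is None or valeur > max_end
def pvStepB (acc : PySem.Dict Int Int × Option Int) (kv : Int × Int) :
    PySem.Dict Int Int × Option Int :=
  match acc.2 with
  | none => (acc.1.insert kv.1 kv.2, some kv.2)
  | some m => if m < kv.2 then (acc.1.insert kv.1 kv.2, some kv.2) else acc

def filtrer_ranges_py_alt (dictionnary : List (Int × Int)) : List (Int × Int) :=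
  ((PySem.List.sorted2 dictionnary (fun p => p.1) (fun p => p.2)).foldl pvStepB
    (PySem.Dict.empty, none)).1.items

-- ===== PRECONDITION & SPEC =====
def Spec_filtrer_ranges_py (dictionnary : List (Int × Int)) (out : List (Int × Int)) : Prop := out = filtrer_ranges_py_alt dictionnary
instance (dictionnary : List (Int × Int)) (out : List (Int × Int)) : Decidable (Spec_filtrer_ranges_py dictionnary out) := by unfold Spec_filtrer_ranges_py; infer_instance

-- ===== CLAIM (what is proved, stated in full; the proofs are below) =====
def Claim_equal_filtrer_ranges_py : Prop := ∀ (dictionnary : List (Int × Int)), Dom_filtrer_ranges_py dictionnary → Spec_filtrer_ranges_py dictionnary (filtrer_ranges_py dictionnary)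

-- ===== LEMMAS AND PROOFS =====

-- the lexicographic comparator sorted2 uses (reverse = false)
def pvLex (a b : Int × Int) : Bool :=
  decide (a.1 < b.1) || (!decide (b.1 < a.1) && decide (a.2 < b.2))

lemma pvLex_trans {a b c : Int × Int} (h1 : pvLex a b = true) (h2 : pvLex b c = true) :
    pvLex a c = true := by
  simp only [pvLex, Bool.or_eq_true, Bool.and_eq_true, Bool.not_eq_eq_eq_not,
    Bool.not_true, decide_eq_true_eq, decide_eq_false_iff_not] at *
  omega

lemma pvLex_irrefl (a : Int × Int) : pvLex a a = false := by
  simp [pvLex]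

lemma pvInsertBy_pairwise (x : Int × Int) (l : List (Int × Int))
    (h : l.Pairwise (fun a b => pvLex b a = false)) :
    (PySem.List.insertBy pvLex x l).Pairwise (fun a b => pvLex b a = false) := by
  induction l with
  | nil => simp [PySem.List.insertBy]
  | cons y ys ih =>
    rw [List.pairwise_cons] at h
    by_cases hxy : pvLex x y = true
    · rw [PySem.List.insertBy, if_pos hxy]
      refine List.Pairwise.cons ?_ (List.pairwise_cons.mpr h)
      intro z hz
      rcases List.mem_cons.mp hz with rfl | hz
      · cases hyx : pvLex z x
        · rfl
        · exact absurd (pvLex_trans hyx hxy) (by rw [pvLex_irrefl]; simp)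
      · cases hzx : pvLex z x
        · rfl
        · have := pvLex_trans hzx hxy
          rw [h.1 z hz] at this
          exact absurd this (by simp)
    · rw [PySem.List.insertBy, if_neg hxy]
      refine List.Pairwise.cons ?_ (ih h.2)
      intro z hz
      rcases (PySem.List.mem_insertBy _ _ _ _).mp hz with rfl | hz
      · simpa using hxy
      · exact h.1 z hz

lemma pvSorted2_pairwise (xs : List (Int × Int)) :
    (PySem.List.sorted2 xs (fun p => p.1) (fun p => p.2)).Pairwise
      (fun a b : Int × Int => a.1 ≤ b.1) := by
  have key : ∀ (l : List (Int × Int)) (acc : List (Int × Int)),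
      acc.Pairwise (fun a b => pvLex b a = false) →
      (l.foldl (fun acc x => PySem.List.insertBy pvLex x acc) acc).Pairwise
        (fun a b => pvLex b a = false) := by
    intro l
    induction l with
    | nil => intro acc h; exact h
    | cons x t ih => intro acc h; exact ih _ (pvInsertBy_pairwise x acc h)
  have h := key xs [] (by simp)
  have heq : PySem.List.sorted2 xs (fun p => p.1) (fun p => p.2) =
      xs.foldl (fun acc x => PySem.List.insertBy pvLex x acc) [] := rfl
  rw [heq]
  refine List.Pairwise.imp ?_ h
  intro a b hab
  simp only [pvLex, Bool.or_eq_false_iff, Bool.and_eq_false_iff, Bool.not_eq_eq_eq_not,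
    Bool.not_false, decide_eq_false_iff_not, decide_eq_true_eq] at hab
  omega

-- the joint loop invariant: A's (resultats, ranges_traites) fold and B's (resultats, max_end)
-- fold produce the same resultats, provided every processed key is ≥ every accepted key and
-- max_end is exactly the maximum accepted end (none iff nothing accepted yet).
lemma pvFold_eq (l : List (Int × Int)) (res : PySem.Dict Int Int)
    (tr : List (Int × Int)) (mo : Option Int)
    (hord : l.Pairwise (fun a b : Int × Int => a.1 ≤ b.1))
    (hkeys : ∀ p ∈ tr, ∀ q ∈ l, p.1 ≤ q.1)
    (hmax : (mo = none ∧ tr = []) ∨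
            ∃ m, mo = some m ∧ (∀ p ∈ tr, p.2 ≤ m) ∧ (∃ p ∈ tr, p.2 = m)) :
    (l.foldl pvStepA (res, tr)).1 = (l.foldl pvStepB (res, mo)).1 := by
  induction l generalizing res tr mo with
  | nil => rfl
  | cons kv t ih =>
    rw [List.pairwise_cons] at hord
    rw [List.foldl_cons, List.foldl_cons]
    rcases hmax with ⟨rfl, rfl⟩ | ⟨m, rfl, hle, p0, hp0, hp0e⟩
    · -- nothing accepted yet: both accept kv
      have hA : pvStepA (res, []) kv = (res.insert kv.1 kv.2, [(kv.1, kv.2)]) := rfl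
      have hB : pvStepB (res, none) kv = (res.insert kv.1 kv.2, some kv.2) := rfl
      rw [hA, hB]
      refine ih _ _ _ hord.2 ?_ ?_
      · intro p hp q hq
        rcases List.mem_singleton.mp hp with rfl
        exact hord.1 q hq
      · exact Or.inr ⟨kv.2, rfl, by simp, ⟨(kv.1, kv.2), by simp⟩⟩
    · -- something accepted: A's inner scan finds a container iff kv.2 ≤ max_end
      have hklow : ∀ p ∈ tr, p.1 ≤ kv.1 := fun p hp => hkeys p hp kv (List.mem_cons_self ..)
      have hany : (tr.any (fun r => decide (kv.1 ≥ r.1) && decide (kv.2 ≤ r.2)))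
          = decide (kv.2 ≤ m) := by
        by_cases hvm : kv.2 ≤ m
        · rw [decide_eq_true hvm, List.any_eq_true]
          refine ⟨p0, hp0, ?_⟩
          have := hklow p0 hp0
          simp only [Bool.and_eq_true, decide_eq_true_eq, ge_iff_le]
          omega
        · rw [decide_eq_false hvm, List.any_eq_false]
          intro p hp
          have h1 := hle p hp
          simp only [Bool.and_eq_true, decide_eq_true_eq, ge_iff_le, not_and]
          intro _; omega
      have hstepA : pvStepA (res, tr) kv =
          (if kv.2 ≤ m then (res, tr)
           else (res.insert kv.1 kv.2, tr ++ [(kv.1, kv.2)])) := by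
        simp only [pvStepA, hany]
        by_cases hvm : kv.2 ≤ m <;> simp [hvm]
      have hstepB : pvStepB (res, some m) kv =
          (if m < kv.2 then (res.insert kv.1 kv.2, some kv.2) else (res, some m)) := rfl
      rw [hstepA, hstepB]
      by_cases hvm : kv.2 ≤ m
      · rw [if_pos hvm, if_neg (by omega)]
        refine ih _ _ _ hord.2 ?_ (Or.inr ⟨m, rfl, hle, p0, hp0, hp0e⟩)
        intro p hp q hq
        exact hkeys p hp q (List.mem_cons_of_mem _ hq)
      · rw [if_neg hvm, if_pos (by omega)]
        refine ih _ _ _ hord.2 ?_ ?_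
        · intro p hp q hq
          rcases List.mem_append.mp hp with hp | hp
          · exact hkeys p hp q (List.mem_cons_of_mem _ hq)
          · rcases List.mem_singleton.mp hp with rfl
            exact hord.1 q hq
        · refine Or.inr ⟨kv.2, rfl, ?_, ⟨(kv.1, kv.2), by simp⟩⟩
          intro p hp
          rcases List.mem_append.mp hp with hp | hp
          · have := hle p hp; omega
          · rcases List.mem_singleton.mp hp with rfl
            simp

-- ===== VERDICT (by name: the statement is the Claim_ definition above) =====
theorem filtrer_ranges_py_spec : Claim_equal_filtrer_ranges_py := by
  intro d _
  unfold Spec_filtrer_ranges_py filtrer_ranges_py filtrer_ranges_py_alt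
  have h := pvFold_eq (PySem.List.sorted2 d (fun p => p.1) (fun p => p.2))
    PySem.Dict.empty [] none (pvSorted2_pairwise d) (by simp) (Or.inl ⟨rfl, rfl⟩)
  rw [h]
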